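-- pv_equiv track=rewrite | github.com/surajPrajapati-rgb/Search-Engine-and-Information-Retrieval | Web-document similarity project/calculateSimilarity.py | computeHashValue
-- ===== SOURCE A (Python) =====
-- def computeHashValue(word_dict):
--     p = 53
--     m = 2**64
--     words_with_hash = {}
--     for word in word_dict:
--         hash = 0
--         n=len(word)
--         for j in range(n):
--             ascii_value = ord(word[j])
--             hash += ascii_value*(p**j)  # hash(s) = s[0] + s[1].p  + s[2].p^2   + ..... + s[n-1].p^(n-1)
--         hash = hash % m
--         binary_string = bin(hash)[2:]  # converting hash into binary value
--         binary_string_64_bit = binary_string.zfill(64) # (Zerofill) making the binary value with 64 bit by filling the extra 0 in front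
--         words_with_hash[word] = (word_dict[word], binary_string_64_bit)
--     return words_with_hash
-- ===== SOURCE B (Python) =====
-- def _hash64(word):
--     m = 1 << 64
--     h = 0
--     power = 1
--     for ch in word:
--         h = (h + ord(ch) * power) % m
--         power = (power * 53) % m
--     return format(h, '064b')
--
--
-- def computeHashValue(word_dict):
--     return {word: (value, _hash64(word)) for word, value in word_dict.items()}
-- ===== Notes on version B (the rewrite author's own statement) =====
-- stated objective: alternative
-- what changed: Per word, B keeps a running power reduced mod 2**64 at every step (power = power*53 % m) instead of recomputing the big-integer p**j for each position and reducing only once at the end, and formats the result directly with format(h, '064b') instead of bin()[2:].zfill(64); intended as faster on long words (O(n) word-sized ops vs O(n^2) bit ops per word), but a timing run on its input mix measured only 1.3x at the largest size, so no speed is claimed.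
import Mathlib
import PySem

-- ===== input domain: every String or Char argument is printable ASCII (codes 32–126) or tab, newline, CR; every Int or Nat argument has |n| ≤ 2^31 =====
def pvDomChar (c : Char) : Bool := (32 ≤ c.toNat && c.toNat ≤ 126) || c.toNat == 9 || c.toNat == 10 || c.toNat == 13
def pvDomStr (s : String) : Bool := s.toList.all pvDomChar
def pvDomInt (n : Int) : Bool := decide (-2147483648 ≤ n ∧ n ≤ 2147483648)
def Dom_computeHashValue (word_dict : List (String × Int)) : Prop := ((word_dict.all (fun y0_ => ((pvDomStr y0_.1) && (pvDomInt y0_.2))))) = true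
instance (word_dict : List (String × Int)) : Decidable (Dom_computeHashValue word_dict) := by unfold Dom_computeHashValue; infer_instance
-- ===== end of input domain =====

-- B replaces A's per-position big-integer power p**j (reduced only once at the end) by a
-- running power kept reduced mod 2^64 at every step, and formats the hash directly as a
-- zero-padded 64-bit binary string (alternative algorithm; no speed claim).

-- ===== PORT A =====
def computeHashValue (word_dict : List (String × Int)) : List (String × Int × String) :=
  let p : Int := 53
  let m : Int := 2 ^ 64
  -- 'for word in word_dict' iterates the dict's keys; word_dict[word] is the value stored
  -- with that key, so the loop runs over the dict's (key, value) items.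
  let d := PySem.Dict.ofList word_dict
  let words_with_hash := d.items.foldl (fun (acc : PySem.Dict String (Int × String)) kv =>
    let word := kv.1
    let cs := word.toList
    let hash := (PySem.List.pyRange 0 (PySem.Str.len word) 1).foldl
      (fun h j => h + ((PySem.List.pyGetD cs j ' ').toNat : Int) * p ^ j.toNat) 0
    let hash := PySem.Int.mod hash m
    let binary_string := PySem.Str.slice (PySem.Int.pyBin hash) (some 2) none
    let binary_string_64_bit := PySem.Str.zfill binary_string 64
    acc.insert word (kv.2, binary_string_64_bit)) PySem.Dict.empty
  words_with_hash.items

-- ===== PORT B =====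
def pvHash64 (word : String) : String :=
  let m : Int := 2 ^ 64
  let hp := word.toList.foldl (fun (st : Int × Int) c =>
      (PySem.Int.mod (st.1 + (c.toNat : Int) * st.2) m, PySem.Int.mod (st.2 * 53) m)) (0, 1)
  -- format(h, '064b') for 0 ≤ h < 2^64: the binary digits left-padded with '0' to width 64
  PySem.Str.zfill (PySem.Int.toBin hp.1) 64

def computeHashValue_alt (word_dict : List (String × Int)) : List (String × Int × String) :=
  -- the dict comprehension runs over the dict's items, whose keys are distinct,
  -- so it produces one output pair per item in order
  (PySem.Dict.ofList word_dict).items.map (fun kv => (kv.1, kv.2, pvHash64 kv.1))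

-- ===== PRECONDITION & SPEC =====
def Spec_computeHashValue (word_dict : List (String × Int)) (out : List (String × Int × String)) : Prop := out = computeHashValue_alt word_dict
instance (word_dict : List (String × Int)) (out : List (String × Int × String)) : Decidable (Spec_computeHashValue word_dict out) := by unfold Spec_computeHashValue; infer_instance

-- ===== CLAIM (what is proved, stated in full; the proofs are below) =====
def Claim_equal_computeHashValue : Prop := ∀ (word_dict : List (String × Int)), Dom_computeHashValue word_dict → Spec_computeHashValue word_dict (computeHashValue word_dict)

-- ===== LEMMAS AND PROOFS =====

-- the polynomial hash value of a word, Horner-style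
def pvS : List Char → Int
  | [] => 0
  | c :: cs => (c.toNat : Int) + 53 * pvS cs

theorem pvS_sum (cs : List Char) :
    ((List.range cs.length).map
      (fun k => ((cs.getD k ' ').toNat : Int) * 53 ^ k)).sum = pvS cs := by
  induction cs with
  | nil => simp [pvS]
  | cons c cs ih =>
    rw [List.length_cons, List.range_succ_eq_map]
    simp only [List.map_cons, List.map_map, List.sum_cons]
    have : (List.map ((fun k => ((List.getD (c :: cs) k ' ').toNat : Int) * 53 ^ k) ∘ Nat.succ)
        (List.range cs.length)).sum
        = (List.map (fun k => (((cs.getD k ' ').toNat : Int) * 53 ^ k) * 53)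
        (List.range cs.length)).sum := by
      apply congrArg
      apply List.map_congr_left
      intro k _
      simp [Function.comp, pow_succ]
      ring
    rw [this, List.sum_map_mul_right, ih]
    simp [pvS]
    ring

theorem pvB_invariant (cs : List Char) (a b : Int) :
    (cs.foldl (fun (st : Int × Int) c =>
        (PySem.Int.mod (st.1 + (c.toNat : Int) * st.2) (2 ^ 64),
         PySem.Int.mod (st.2 * 53) (2 ^ 64)))
      (PySem.Int.mod a (2 ^ 64), PySem.Int.mod b (2 ^ 64))).1
    = PySem.Int.mod (a + b * pvS cs) (2 ^ 64) := by
  have hm : (0:Int) < 2 ^ 64 := by positivity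
  induction cs generalizing a b with
  | nil => simp [pvS]
  | cons c cs ih =>
    simp only [List.foldl_cons, pvS]
    have ha : a % (2:Int) ^ 64 ≡ a [ZMOD (2:Int) ^ 64] := Int.emod_emod_of_dvd a dvd_rfl
    have hb : b % (2:Int) ^ 64 ≡ b [ZMOD (2:Int) ^ 64] := Int.emod_emod_of_dvd b dvd_rfl
    have e1 : PySem.Int.mod (PySem.Int.mod a (2 ^ 64) + (c.toNat : Int) * PySem.Int.mod b (2 ^ 64)) (2 ^ 64)
        = PySem.Int.mod (a + (c.toNat : Int) * b) (2 ^ 64) := by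
      simp only [PySem.Int.mod_eq_emod_of_pos hm]
      exact Int.ModEq.add ha (Int.ModEq.mul_left _ hb)
    have e2 : PySem.Int.mod (PySem.Int.mod b (2 ^ 64) * 53) (2 ^ 64)
        = PySem.Int.mod (b * 53) (2 ^ 64) := by
      simp only [PySem.Int.mod_eq_emod_of_pos hm]
      exact Int.ModEq.mul_right _ hb
    rw [e1, e2, ih]
    congr 1
    ring

-- bin(h)[2:] equals format(h, 'b') for a nonnegative h
theorem pvBin_slice (h : Int) (hh : 0 ≤ h) :
    PySem.Str.slice (PySem.Int.pyBin h) (some 2) none = PySem.Int.toBin h := by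
  have : (PySem.Str.slice (PySem.Int.pyBin h) (some 2) none).toList = (PySem.Int.toBin h).toList := by
    rw [PySem.Str.toList_slice, PySem.Chars.slice_eq_listSlice, PySem.Int.toList_pyBin,
        PySem.Int.toList_toBin]
    have h2 : (PySem.List.slice (PySem.Int.toBinChars0b h) (some ((2:Nat):Int)) none)
        = (PySem.Int.toBinChars0b h).drop 2 := PySem.List.slice_from_natCast _ 2
    have hlt : ¬ h < 0 := not_lt.mpr hh
    simp only [PySem.Int.toBinChars0b, PySem.Int.toBinChars, if_neg hlt] at *
    exact_mod_cast h2
  have h2 := congrArg String.ofList this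
  rwa [String.ofList_toList, String.ofList_toList] at h2

-- per-word agreement of the two hash/format pipelines
theorem pvWord_eq (w : String) :
    PySem.Str.zfill
      (PySem.Str.slice
        (PySem.Int.pyBin
          (PySem.Int.mod
            ((PySem.List.pyRange 0 (PySem.Str.len w) 1).foldl
              (fun h j => h + ((PySem.List.pyGetD w.toList j ' ').toNat : Int) * 53 ^ j.toNat) 0)
            (2 ^ 64)))
        (some 2) none) 64
    = pvHash64 w := by
  have hm : (0:Int) < 2 ^ 64 := by positivity
  -- A's inner loop computes the polynomial sum pvS w.toList
  have hsum : (PySem.List.pyRange 0 (PySem.Str.len w) 1).foldl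
      (fun h j => h + ((PySem.List.pyGetD w.toList j ' ').toNat : Int) * 53 ^ j.toNat) 0
      = pvS w.toList := by
    rw [PySem.Str.len_eq, PySem.List.pyRange_zero_natCast, List.foldl_map]
    have : ∀ (k : Nat), ((PySem.List.pyGetD w.toList ((k:Nat):Int) ' ').toNat : Int) * 53 ^ ((k:Nat):Int).toNat
        = ((w.toList.getD k ' ').toNat : Int) * 53 ^ k := by
      intro k; rw [PySem.List.pyGetD_natCast]; simp
    calc (List.range w.toList.length).foldl
          (fun h k => h + ((PySem.List.pyGetD w.toList ((k:Nat):Int) ' ').toNat : Int) * 53 ^ ((k:Nat):Int).toNat) 0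
        = (List.range w.toList.length).foldl
          (fun h k => h + ((w.toList.getD k ' ').toNat : Int) * 53 ^ k) 0 := by
          exact PySem.List.foldl_congr_mem (List.range w.toList.length) _ _ 0
            (fun acc k _ => by rw [this k])
      _ = pvS w.toList := by
          rw [PySem.List.foldl_add]
          rw [pvS_sum w.toList]
          ring
  -- B's loop computes the same value reduced mod 2^64
  have hB : (w.toList.foldl (fun (st : Int × Int) c =>
        (PySem.Int.mod (st.1 + (c.toNat : Int) * st.2) (2 ^ 64),
         PySem.Int.mod (st.2 * 53) (2 ^ 64))) (0, 1)).1
      = PySem.Int.mod (pvS w.toList) (2 ^ 64) := by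
    have h0 : ((0:Int), (1:Int)) = (PySem.Int.mod 0 (2 ^ 64), PySem.Int.mod 1 (2 ^ 64)) := by
      rw [PySem.Int.mod_eq_emod_of_pos hm, PySem.Int.mod_eq_emod_of_pos hm]
      norm_num
    rw [h0, pvB_invariant]
    norm_num
  rw [hsum, pvBin_slice _ (PySem.Int.mod_nonneg _ hm)]
  simp only [pvHash64, hB]

-- ===== VERDICT (by name: the statement is the Claim_ definition above) =====
theorem computeHashValue_spec : Claim_equal_computeHashValue := by
  intro word_dict _
  unfold Spec_computeHashValue computeHashValue computeHashValue_alt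
  simp only []
  rw [PySem.Dict.items_foldl_insert_fresh
        ((PySem.Dict.ofList word_dict).items) (fun kv => kv.1)
        _ PySem.Dict.empty
        (fun a _ => PySem.Dict.contains_empty a.1)
        (PySem.Dict.nodup_keys_ofList word_dict)]
  rw [show (PySem.Dict.empty : PySem.Dict String (Int × String)).items = [] from rfl,
      List.nil_append]
  apply List.map_congr_left
  intro kv _
  exact congrArg (fun s => (kv.1, kv.2, s)) (pvWord_eq kv.1)
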